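-- pv_equiv track=rewrite | github.com/pypi-data/pypi-mirror-392 | packages/json-leases-to-unbound/json_leases_to_unbound-0.0.1-py3-none-any.whl/json_leases_to_unbound/core.py | filter_leases_by_expiration
-- ===== SOURCE A (Python) =====
-- def filter_leases_by_expiration(leases) -> list:
--     filtered_leases = {}
--     for lease in leases:
--         if filtered_leases.get(lease['hostname']) is None:
--             filtered_leases[lease['hostname']] = lease
--         else:
--             if filtered_leases[lease['hostname']]['expire'] < lease['expire']:
--                 filtered_leases[lease['hostname']] = lease
--     return list(filtered_leases.values())
-- ===== SOURCE B (Python) =====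
-- def filter_leases_by_expiration(leases) -> list:
--     groups = {}
--     for lease in leases:
--         groups.setdefault(lease['hostname'], []).append(lease)
--     return [max(group, key=lambda l: l['expire']) for group in groups.values()]
-- ===== Notes on version B (the rewrite author's own statement) =====
-- stated objective: alternative
-- what changed: B replaces A's single running-maximum dict (compare-and-overwrite per lease) with a group-by pass building hostname -> list of leases, followed by max(group, key=expire) per group; insertion order and max's first-maximal rule reproduce A's order and tie-breaks.
-- outside the precondition, e.g. on filter_leases_by_expiration([{'hostname': 'h'}]): A returns [{'hostname': 'h'}], B raises KeyError
import Mathlib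
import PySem

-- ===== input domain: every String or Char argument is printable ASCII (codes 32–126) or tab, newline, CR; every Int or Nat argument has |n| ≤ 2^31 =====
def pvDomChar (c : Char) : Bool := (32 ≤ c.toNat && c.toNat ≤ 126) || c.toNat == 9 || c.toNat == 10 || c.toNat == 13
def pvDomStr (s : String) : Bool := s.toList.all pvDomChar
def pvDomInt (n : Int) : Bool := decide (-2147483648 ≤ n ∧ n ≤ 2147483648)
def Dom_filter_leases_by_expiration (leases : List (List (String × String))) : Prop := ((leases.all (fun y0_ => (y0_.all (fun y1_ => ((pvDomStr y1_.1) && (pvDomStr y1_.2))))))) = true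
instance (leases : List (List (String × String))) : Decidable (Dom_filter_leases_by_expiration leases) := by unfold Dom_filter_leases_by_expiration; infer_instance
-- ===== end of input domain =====

-- B groups leases by hostname in one dict pass and picks each group's first max-expire lease;
-- same return value as A (alternative decomposition, no speed claim).

-- shared port of Python dict indexing on a lease: lease[k] (none = KeyError, excluded by Pre_)
def pvLeaseGet (lease : List (String × String)) (k : String) : Option String :=
  (PySem.Dict.ofList lease).get? k

-- lease['hostname'] / lease['expire'] as total values ("" only outside Pre_)
def pvHost (lease : List (String × String)) : String := (pvLeaseGet lease "hostname").getD ""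
def pvExp (lease : List (String × String)) : List Char := ((pvLeaseGet lease "expire").getD "").toList

-- ===== PORT A =====
-- body of A's for-loop
def pvStepA (fl : PySem.Dict String (List (String × String))) (lease : List (String × String)) :
    PySem.Dict String (List (String × String)) :=
  match fl.get? (pvHost lease) with
  | none => fl.insert (pvHost lease) lease
  | some cur =>
      if pvExp cur < pvExp lease then fl.insert (pvHost lease) lease else fl

def filter_leases_by_expiration (leases : List (List (String × String))) : List (List (String × String)) :=
  (leases.foldl pvStepA PySem.Dict.empty).values

-- ===== PORT B =====
-- groups.setdefault(lease['hostname'], []).append(lease)  ==  groups[h] = groups.get(h, []) + [lease]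
def pvStepB (g : PySem.Dict String (List (List (String × String)))) (lease : List (String × String)) :
    PySem.Dict String (List (List (String × String))) :=
  g.modify (pvHost lease) [] (· ++ [lease])

-- max(group, key=lambda l: l['expire'])  (first maximal element), [] unreachable on Pre_
def pvMaxExpire (group : List (List (String × String))) : List (String × String) :=
  (PySem.List.max? group pvExp).getD []

def filter_leases_by_expiration_alt (leases : List (List (String × String))) : List (List (String × String)) :=
  ((leases.foldl pvStepB PySem.Dict.empty).values).map pvMaxExpire

-- ===== PRECONDITION & SPEC =====
-- Pre_ excludes leases missing the 'hostname' or 'expire' key: there A raises KeyError, or (a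
-- lease with a unique hostname and no 'expire') A happens never to read 'expire' while B's max() does.
def Pre_filter_leases_by_expiration (leases : List (List (String × String))) : Prop :=
  (leases.all (fun lease => ((PySem.Dict.ofList lease).get? "hostname").isSome
      && ((PySem.Dict.ofList lease).get? "expire").isSome)) = true
instance (leases : List (List (String × String))) : Decidable (Pre_filter_leases_by_expiration leases) := by
  unfold Pre_filter_leases_by_expiration; infer_instance

def pvWitness_filter_leases_by_expiration : (List (List (String × String))) :=
  [[("hostname", "a"), ("expire", "1")], [("hostname", "a"), ("expire", "2")]]

def Spec_filter_leases_by_expiration (leases : List (List (String × String))) (out : List (List (String × String))) : Prop := out = filter_leases_by_expiration_alt leases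
instance (leases : List (List (String × String))) (out : List (List (String × String))) : Decidable (Spec_filter_leases_by_expiration leases out) := by unfold Spec_filter_leases_by_expiration; infer_instance

-- ===== CLAIM (what is proved, stated in full; the proofs are below) =====
def Claim_equal_filter_leases_by_expiration : Prop := ∀ (leases : List (List (String × String))), Dom_filter_leases_by_expiration leases → Pre_filter_leases_by_expiration leases → Spec_filter_leases_by_expiration leases (filter_leases_by_expiration leases)

-- ===== LEMMAS AND PROOFS =====

-- the loop invariant tying A's dict to B's grouping dict
def pvInv (fl : PySem.Dict String (List (String × String)))
    (g : PySem.Dict String (List (List (String × String)))) : Prop :=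
  fl.items = g.items.map (fun p => (p.1, pvMaxExpire p.2))
    ∧ g.keys.Nodup ∧ ∀ p ∈ g.items, p.2 ≠ []

theorem pvMaxExpire_singleton (x : List (String × String)) : pvMaxExpire [x] = x := rfl

theorem pvMaxExpire_append (gs : List (List (String × String))) (x : List (String × String))
    (h : gs ≠ []) :
    pvMaxExpire (gs ++ [x]) =
      if pvExp (pvMaxExpire gs) < pvExp x then x else pvMaxExpire gs := by
  obtain ⟨m, hm⟩ := Option.ne_none_iff_exists'.mp (by
    intro hn; exact h ((PySem.List.max?_eq_none_iff gs pvExp).mp hn))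
  unfold pvMaxExpire PySem.List.max?
  unfold PySem.List.max? at hm
  rw [List.foldl_append, hm]
  simp only [List.foldl_cons, List.foldl_nil, Option.getD_some]
  split_ifs <;> rfl

theorem pvGet?_map (items : List (String × List (List (String × String)))) (k : String) :
    (PySem.Dict.mk (items.map (fun p => (p.1, pvMaxExpire p.2)))).get? k
      = ((PySem.Dict.mk items).get? k).map pvMaxExpire := by
  induction items with
  | nil => rfl
  | cons p rest ih =>
      obtain ⟨k1, v1⟩ := p
      simp only [List.map_cons, PySem.Dict.get?_mk_cons]
      by_cases hk : k1 = k
      · subst hk; simp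
      · simp only [beq_iff_eq, hk, ite_false]
        exact ih

theorem pvStep_inv (fl : PySem.Dict String (List (String × String)))
    (g : PySem.Dict String (List (List (String × String))))
    (x : List (String × String)) (hinv : pvInv fl g) :
    pvInv (pvStepA fl x) (pvStepB g x) := by
  obtain ⟨hitems, hnodup, hne⟩ := hinv
  have hfl : fl = PySem.Dict.mk (g.items.map (fun p => (p.1, pvMaxExpire p.2))) := by
    apply PySem.Dict.ext; exact hitems
  have hget : fl.get? (pvHost x) = (g.get? (pvHost x)).map pvMaxExpire := by
    rw [hfl]; exact pvGet?_map g.items (pvHost x)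
  have hcont : fl.contains (pvHost x) = g.contains (pvHost x) := by
    rw [PySem.Dict.contains_eq_isSome_get?, PySem.Dict.contains_eq_isSome_get?, hget]
    simp
  unfold pvStepB PySem.Dict.modify
  cases hg : g.get? (pvHost x) with
  | none =>
      have hflg : fl.get? (pvHost x) = none := by rw [hget, hg]; rfl
      have hstep : pvStepA fl x = fl.insert (pvHost x) x := by
        unfold pvStepA; rw [hflg]
      have hgc : g.contains (pvHost x) = false := by
        rw [PySem.Dict.contains_eq_isSome_get?, hg]; rfl
      have hflc : fl.contains (pvHost x) = false := by rw [hcont]; exact hgc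
      have hgd : g.getD (pvHost x) [] = [] := PySem.Dict.getD_of_get?_eq_none g [] hg
      rw [hstep, hgd]
      refine ⟨?_, ?_, ?_⟩
      · rw [PySem.Dict.items_insert_of_not_contains _ _ hflc,
          PySem.Dict.items_insert_of_not_contains _ _ hgc]
        simp [hitems, pvMaxExpire_singleton]
      · exact PySem.Dict.nodup_keys_insert _ _ _ hnodup
      · intro p hp
        rcases (PySem.Dict.mem_items_insert _ _ _ _).mp hp with h | ⟨h, _⟩
        · rw [h]; simp
        · exact hne p h
  | some gs =>
      have hgs_ne : gs ≠ [] := hne _ (PySem.Dict.mem_items_of_get?_eq_some g hg)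
      have hflg : fl.get? (pvHost x) = some (pvMaxExpire gs) := by rw [hget, hg]; rfl
      have hstep : pvStepA fl x =
          if pvExp (pvMaxExpire gs) < pvExp x then fl.insert (pvHost x) x else fl := by
        unfold pvStepA; rw [hflg]
      have hgc : g.contains (pvHost x) = true := by
        rw [PySem.Dict.contains_eq_isSome_get?, hg]; rfl
      have hflc : fl.contains (pvHost x) = true := by rw [hcont]; exact hgc
      have hgd : g.getD (pvHost x) [] = gs := PySem.Dict.getD_of_get?_eq_some g [] hg
      have hval : ∀ p ∈ g.items, p.1 = pvHost x → p.2 = gs := by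
        intro p hp hk
        have := PySem.Dict.get?_of_mem_items g (k := p.1) (v := p.2) (by exact hp) hnodup
        rw [hk, hg] at this
        exact (Option.some.inj this).symm
      have hmax := pvMaxExpire_append gs x hgs_ne
      rw [hstep, hgd]
      have hitems' : (g.insert (pvHost x) (gs ++ [x])).items
          = g.items.map (fun p => if p.1 == pvHost x then (pvHost x, gs ++ [x]) else p) :=
        PySem.Dict.items_insert_of_contains _ _ hgc
      refine ⟨?_, ?_, ?_⟩
      · split_ifs with hlt
        · rw [PySem.Dict.items_insert_of_contains _ _ hflc, hitems', hitems, List.map_map,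
            List.map_map]
          apply List.map_congr_left
          intro p hp
          by_cases hk : p.1 = pvHost x
          · have h2 : p.2 = gs := hval p hp hk
            simp only [Function.comp, hk, beq_self_eq_true, ite_true]
            rw [hmax, if_pos hlt]
          · simp [Function.comp, hk]
        · rw [hitems', hitems, List.map_map]
          apply List.map_congr_left
          intro p hp
          by_cases hk : p.1 = pvHost x
          · have h2 : p.2 = gs := hval p hp hk
            simp only [Function.comp, hk, beq_self_eq_true, ite_true]
            rw [hmax, if_neg hlt, ← h2, ← hk]
          · simp [Function.comp, hk]
      · exact PySem.Dict.nodup_keys_insert _ _ _ hnodup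
      · intro p hp
        rcases (PySem.Dict.mem_items_insert _ _ _ _).mp hp with h | ⟨h, _⟩
        · rw [h]; simp [hgs_ne]
        · exact hne p h

theorem pvFold_inv (leases : List (List (String × String)))
    (fl : PySem.Dict String (List (String × String)))
    (g : PySem.Dict String (List (List (String × String)))) (hinv : pvInv fl g) :
    pvInv (leases.foldl pvStepA fl) (leases.foldl pvStepB g) := by
  induction leases generalizing fl g with
  | nil => exact hinv
  | cons x rest ih => exact ih _ _ (pvStep_inv fl g x hinv)

-- ===== VERDICT (by name: the statement is the Claim_ definition above) =====
theorem filter_leases_by_expiration_spec : Claim_equal_filter_leases_by_expiration := by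
  intro leases _ _
  unfold Spec_filter_leases_by_expiration
  unfold filter_leases_by_expiration filter_leases_by_expiration_alt
  have h := pvFold_inv leases PySem.Dict.empty PySem.Dict.empty
    ⟨rfl, List.nodup_nil, by intro p hp; simp [PySem.Dict.empty] at hp⟩
  obtain ⟨hitems, _, _⟩ := h
  simp [PySem.Dict.values, hitems, List.map_map, Function.comp]
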